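-- pv_equiv track=rewrite | github.com/BLSHEE22/constrained-counterpoint | counterpoint.py | melToLily
-- ===== SOURCE A (Python) =====
-- def melToLily(mel, sc):
--     lilyMelody = []
--     i = 0
--     while i < len(mel):
--         semis = mel[i]
--         s = ""
--         if semis < -12:
--             while semis < -12:
--                 s += ","
--                 semis += 12
--             semis = mel[i]
--         while semis > -1:
--             s += "'"
--             semis -= 12
--         # whole note
--         s += "1"
--         lilyMelody.append(sc[mel[i]%12] + s)
--         i += 1
--
--     # put together return string
--     mel = [sc[x%12] for x in mel]
--     retStr = ""
--     for x in lilyMelody: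
--         retStr += x + " "
--
--     return retStr
-- ===== SOURCE B (Python) =====
-- def _suffix(v):
--     if v < -12:
--         return ',' * ((-13 - v) // 12 + 1)
--     if v >= 0:
--         return "'" * (v // 12 + 1)
--     return ''
--
-- def melToLily(mel, sc):
--     notes = [sc[v % 12] + _suffix(v) + '1' for v in mel]
--     return ' '.join(notes) + ' ' if notes else ''
-- ===== Notes on version B (the rewrite author's own statement) =====
-- stated objective: simpler
-- what changed: Replaces the per-note comma/apostrophe while-loops with closed-form floor-division counts and string repetition, and replaces the index-driven outer loop plus quadratic 'retStr +=' accumulation with a comprehension and a single linear ' '.join; the dead recomputation line is dropped.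
import Mathlib
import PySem

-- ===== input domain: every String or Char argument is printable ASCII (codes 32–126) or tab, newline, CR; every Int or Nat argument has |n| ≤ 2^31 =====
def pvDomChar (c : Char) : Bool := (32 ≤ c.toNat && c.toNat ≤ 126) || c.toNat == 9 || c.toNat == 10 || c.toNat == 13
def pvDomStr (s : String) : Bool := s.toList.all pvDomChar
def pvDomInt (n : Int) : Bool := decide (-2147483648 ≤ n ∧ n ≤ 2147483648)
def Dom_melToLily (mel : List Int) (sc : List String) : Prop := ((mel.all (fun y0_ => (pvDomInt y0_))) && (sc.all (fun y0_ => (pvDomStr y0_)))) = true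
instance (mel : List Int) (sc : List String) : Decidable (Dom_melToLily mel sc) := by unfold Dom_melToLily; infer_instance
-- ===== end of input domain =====

-- B replaces A's per-note comma/apostrophe while-loops by closed-form floor-division
-- counts with string repetition, and the manual accumulation by ' '.join (objective: simpler).

-- ===== PORT A =====
-- inner `while semis < -12: s += ","; semis += 12`
def pvCommasA (semis : Int) : String :=
  if semis < -12 then "," ++ pvCommasA (semis + 12) else ""
termination_by (-12 - semis).toNat
decreasing_by omega

-- inner `while semis > -1: s += "'"; semis -= 12`
def pvAposA (semis : Int) : String :=
  if semis > -1 then "'" ++ pvAposA (semis - 12) else ""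
termination_by (semis + 1).toNat
decreasing_by omega

def melToLily (mel : List Int) (sc : List String) : String :=
  -- `while i < len(mel)` over mel[i]; sc[mel[i]%12] is total only under Pre_ (IndexError otherwise)
  let lilyMelody : List String := mel.foldl (fun acc v =>
    let s : String := if v < -12 then pvCommasA v else ""
    let s := s ++ pvAposA v
    let s := s ++ "1"
    acc ++ [PySem.List.pyGetD sc (PySem.Int.mod v 12) "" ++ s]) []
  -- dead recomputation line `mel = [sc[x%12] for x in mel]`
  let _mel2 := mel.map (fun x => PySem.List.pyGetD sc (PySem.Int.mod x 12) "")
  lilyMelody.foldl (fun acc x => acc ++ x ++ " ") ""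

-- ===== PORT B =====
def pvSuffixB (v : Int) : String :=
  if v < -12 then String.ofList (List.replicate (PySem.Int.floordiv (-13 - v) 12 + 1).toNat ',')
  else if v ≥ 0 then String.ofList (List.replicate (PySem.Int.floordiv v 12 + 1).toNat '\'')
  else ""

def melToLily_alt (mel : List Int) (sc : List String) : String :=
  let notes : List String := mel.map (fun v =>
    PySem.List.pyGetD sc (PySem.Int.mod v 12) "" ++ pvSuffixB v ++ "1")
  if notes.isEmpty then "" else PySem.Str.join " " notes ++ " "

-- ===== PRECONDITION & SPEC =====
-- Pre_ excludes exactly the inputs where Python A raises IndexError: some sc[v%12] out of range.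
def Pre_melToLily (mel : List Int) (sc : List String) : Prop :=
  ∀ v ∈ mel, PySem.Raise.InRange sc.length (PySem.Int.mod v 12)
instance (mel : List Int) (sc : List String) : Decidable (Pre_melToLily mel sc) := by
  unfold Pre_melToLily; infer_instance
def pvWitness_melToLily : List Int × List String :=
  ([0, -13, 25, -5], ["c", "cis", "d", "dis", "e", "f", "fis", "g", "gis", "a", "ais", "b"])

def Spec_melToLily (mel : List Int) (sc : List String) (out : String) : Prop := out = melToLily_alt mel sc
instance (mel : List Int) (sc : List String) (out : String) : Decidable (Spec_melToLily mel sc out) := by unfold Spec_melToLily; infer_instance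

-- ===== CLAIM (what is proved, stated in full; the proofs are below) =====
def Claim_equal_melToLily : Prop := ∀ (mel : List Int) (sc : List String), Dom_melToLily mel sc → Pre_melToLily mel sc → Spec_melToLily mel sc (melToLily mel sc)

-- ===== LEMMAS AND PROOFS =====

theorem pvCommasA_eq (v : Int) (h : v < -12) :
    pvCommasA v = String.ofList (List.replicate (PySem.Int.floordiv (-13 - v) 12 + 1).toNat ',') := by
  induction v using pvCommasA.induct with
  | case1 v hv ih =>
    rw [pvCommasA, if_pos hv]
    rw [← String.toList_inj]
    by_cases h2 : v + 12 < -12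
    · rw [ih h2]
      have e1 : PySem.Int.floordiv (-13 - v) 12 = (-13 - v) / 12 := PySem.Int.floordiv_eq_ediv_of_pos (by omega)
      have e2 : PySem.Int.floordiv (-13 - (v + 12)) 12 = (-13 - (v + 12)) / 12 := PySem.Int.floordiv_eq_ediv_of_pos (by omega)
      have hn : ((-13 - v) / 12 + 1).toNat = ((-13 - (v + 12)) / 12 + 1).toNat + 1 := by omega
      simp only [e1, e2]
      simp [hn, List.replicate_succ]
    · rw [pvCommasA, if_neg h2]
      have e1 : PySem.Int.floordiv (-13 - v) 12 = (-13 - v) / 12 := PySem.Int.floordiv_eq_ediv_of_pos (by omega)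
      have hn : ((-13 - v) / 12 + 1).toNat = 1 := by omega
      simp only [e1]
      simp [hn]
  | case2 v hv => omega

theorem pvAposA_eq (v : Int) (h : 0 ≤ v) :
    pvAposA v = String.ofList (List.replicate (PySem.Int.floordiv v 12 + 1).toNat '\'') := by
  induction v using pvAposA.induct with
  | case1 v hv ih =>
    rw [pvAposA, if_pos hv]
    rw [← String.toList_inj]
    by_cases h2 : 0 ≤ v - 12
    · rw [ih h2]
      have e1 : PySem.Int.floordiv v 12 = v / 12 := PySem.Int.floordiv_eq_ediv_of_pos (by omega)
      have e2 : PySem.Int.floordiv (v - 12) 12 = (v - 12) / 12 := PySem.Int.floordiv_eq_ediv_of_pos (by omega)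
      have hn : (v / 12 + 1).toNat = ((v - 12) / 12 + 1).toNat + 1 := by omega
      simp only [e1, e2]
      simp [hn, List.replicate_succ]
    · rw [pvAposA, if_neg (by omega)]
      have e1 : PySem.Int.floordiv v 12 = v / 12 := PySem.Int.floordiv_eq_ediv_of_pos (by omega)
      have hn : (v / 12 + 1).toNat = 1 := by omega
      simp only [e1]
      simp [hn]
  | case2 v hv => omega

theorem pvSuffix_eq (v : Int) :
    (if v < -12 then pvCommasA v else "") ++ pvAposA v = pvSuffixB v := by
  unfold pvSuffixB
  by_cases h1 : v < -12
  · rw [if_pos h1, if_pos h1, pvAposA, if_neg (by omega), pvCommasA_eq v h1]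
    simp
  · rw [if_neg h1, if_neg h1]
    by_cases h2 : 0 ≤ v
    · rw [if_pos h2, pvAposA_eq v h2]
      simp
    · rw [if_neg h2, pvAposA, if_neg (by omega)]
      simp

def pvJoinSp : List String → String
  | [] => ""
  | x :: xs => x ++ " " ++ pvJoinSp xs

theorem pvFoldl_joinSp (l : List String) (a : String) :
    l.foldl (fun acc x => acc ++ x ++ " ") a = a ++ pvJoinSp l := by
  induction l generalizing a with
  | nil => simp [pvJoinSp]
  | cons x xs ih =>
    rw [List.foldl_cons, ih]
    simp [pvJoinSp, String.append_assoc]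

theorem pvJoinSp_eq (l : List String) :
    pvJoinSp l = if l.isEmpty then "" else PySem.Str.join " " l ++ " " := by
  induction l with
  | nil => simp [pvJoinSp]
  | cons x xs ih =>
    cases xs with
    | nil =>
      rw [← String.toList_inj]
      simp [pvJoinSp, PySem.Str.toList_join, PySem.Chars.join_singleton]
    | cons y ys =>
      rw [← String.toList_inj]
      simp only [pvJoinSp] at ih ⊢
      rw [ih]
      simp [PySem.Str.toList_join, PySem.Chars.join_cons_cons]

theorem pvJoin_eq (notes : List String) :
    notes.foldl (fun acc x => acc ++ x ++ " ") "" =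
      if notes.isEmpty then "" else PySem.Str.join " " notes ++ " " := by
  rw [pvFoldl_joinSp, pvJoinSp_eq]
  simp

-- ===== VERDICT (by name: the statement is the Claim_ definition above) =====
theorem melToLily_spec : Claim_equal_melToLily := by
  intro mel sc _ _
  unfold Spec_melToLily melToLily melToLily_alt
  rw [PySem.List.foldl_append_singleton_eq_map
        (fun v => PySem.List.pyGetD sc (PySem.Int.mod v 12) "" ++
          (((if v < -12 then pvCommasA v else "") ++ pvAposA v) ++ "1")) mel []]
  have hmap : mel.map (fun v => PySem.List.pyGetD sc (PySem.Int.mod v 12) "" ++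
        (((if v < -12 then pvCommasA v else "") ++ pvAposA v) ++ "1"))
      = mel.map (fun v => PySem.List.pyGetD sc (PySem.Int.mod v 12) "" ++ pvSuffixB v ++ "1") := by
    apply List.map_congr_left
    intro v _
    rw [pvSuffix_eq v, String.append_assoc]
  simp only [List.nil_append, hmap]
  rw [pvJoin_eq]
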